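-- pv_equiv track=rewrite | github.com/julianazacharias/code-signal-courses | fundamental-interview-preparation/02-loops/03-strings.py | solution
-- ===== SOURCE A (Python) =====
-- def solution(inputString):
--     result = ''
--     length = len(inputString)
--     for i in range(length // 2 + length % 2):
--         result += inputString[i]
--         if length - 1 - i != i:
--             result += inputString[length - 1 - i]
--     return result
-- ===== SOURCE B (Python) =====
-- def solution(inputString):
--     return ''.join(a + b for a, b in zip(inputString, reversed(inputString)))[:len(inputString)]
-- ===== Notes on version B (the rewrite author's own statement) =====
-- stated objective: idiomatic
-- what changed: Replaces the half-length index loop with its middle-character collision test by zipping the string with its reverse, flattening all pairs and truncating to the original length.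
import Mathlib
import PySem

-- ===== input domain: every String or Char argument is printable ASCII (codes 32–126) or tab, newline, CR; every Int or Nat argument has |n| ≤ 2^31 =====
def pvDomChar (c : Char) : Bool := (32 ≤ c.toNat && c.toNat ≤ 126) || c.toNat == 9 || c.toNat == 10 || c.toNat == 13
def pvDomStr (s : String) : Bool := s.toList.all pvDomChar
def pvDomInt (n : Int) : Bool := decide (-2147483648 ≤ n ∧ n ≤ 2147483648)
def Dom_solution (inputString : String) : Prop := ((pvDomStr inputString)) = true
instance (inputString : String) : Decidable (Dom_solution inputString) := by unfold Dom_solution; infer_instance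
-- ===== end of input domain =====

-- B replaces A's half-length loop with its middle-collision test by zipping the string with
-- its reverse, flattening the pairs and truncating to the original length (objective: idiomatic).

-- ===== PORT A =====
-- for-loop over range(length//2 + length%2), building `result` by += ; string indexing is
-- PySem.List.pyGetD on the char list (always in range here, so the default is never read).
def solution (inputString : String) : String :=
  let s := inputString.toList
  let length : Int := s.length
  String.ofList
    ((PySem.List.pyRange 0 (PySem.Int.floordiv length 2 + PySem.Int.mod length 2) 1).foldl
      (fun result i =>
        let result := result ++ [PySem.List.pyGetD s i ' ']
        if length - 1 - i ≠ i then result ++ [PySem.List.pyGetD s (length - 1 - i) ' ']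
        else result)
      [])

-- ===== PORT B =====
-- ''.join(a + b for a, b in zip(s, reversed(s)))[:len(s)] ; the slice [:n] with 0 ≤ n = len
-- is List.take n (exact here since the stop bound is the nonnegative length).
def solution_alt (inputString : String) : String :=
  let s := inputString.toList
  String.ofList (((s.zip s.reverse).flatMap (fun p => [p.1, p.2])).take s.length)

-- ===== PRECONDITION & SPEC =====
def Spec_solution (inputString : String) (out : String) : Prop := out = solution_alt inputString
instance (inputString : String) (out : String) : Decidable (Spec_solution inputString out) := by unfold Spec_solution; infer_instance

-- ===== CLAIM (what is proved, stated in full; the proofs are below) =====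
def Claim_equal_solution : Prop := ∀ (inputString : String), Dom_solution inputString → Spec_solution inputString (solution inputString)

-- ===== LEMMAS AND PROOFS =====

-- the flattened pair list: taking an even prefix is flattening a prefix of the pairs
theorem flat_take_even (lz : List (Char × Char)) (k : Nat) (hk : k ≤ lz.length) :
    ((lz.flatMap (fun p => [p.1, p.2])).take (2 * k)) =
      (lz.take k).flatMap (fun p => [p.1, p.2]) := by
  induction lz generalizing k with
  | nil => simp at hk; simp [hk]
  | cons p t ih =>
    cases k with
    | zero => simp
    | succ k =>
      have : 2 * (k + 1) = (2 * k) + 1 + 1 := by omega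
      simp only [List.flatMap_cons, List.take_succ_cons, this, List.take_succ_cons,
        List.cons_append, List.nil_append, List.take_succ_cons]
      simp [ih k (by simpa using hk)]

-- taking one extra (odd) element picks the first component of the next pair
theorem flat_take_odd (lz : List (Char × Char)) (k : Nat) (hk : k < lz.length) :
    ((lz.flatMap (fun p => [p.1, p.2])).take (2 * k + 1)) =
      (lz.take k).flatMap (fun p => [p.1, p.2]) ++ [lz[k].1] := by
  induction lz generalizing k with
  | nil => simp at hk
  | cons p t ih =>
    cases k with
    | zero => simp
    | succ k =>
      have : 2 * (k + 1) + 1 = (2 * k + 1) + 1 + 1 := by omega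
      simp only [List.flatMap_cons, this, List.take_succ_cons, List.cons_append,
        List.nil_append, List.getElem_cons_succ]
      simp [ih k (by simpa using hk)]

-- A's loop body, per index, on the Nat side
def aStep (l : List Char) (i : Nat) : List Char :=
  l.getD i ' ' :: (if l.length - 1 - i ≠ i then [l.getD (l.length - 1 - i) ' '] else [])

-- the first k full rounds of A (k ≤ n/2) flatten the first k (s[i], s[n-1-i]) pairs
theorem range_flat (l : List Char) (k : Nat) (hk : k ≤ l.length / 2) :
    (List.range k).flatMap (aStep l) =
      ((l.zip l.reverse).take k).flatMap (fun p => [p.1, p.2]) := by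
  induction k with
  | zero => simp
  | succ k ih =>
    have hklt : k < l.length / 2 := by omega
    have hkn : k < l.length := by omega
    have hzlen : k < (l.zip l.reverse).length := by simpa using hkn
    rw [List.range_succ, List.flatMap_append, ih (by omega),
      List.take_succ_eq_append_getElem hzlen, List.flatMap_append]
    congr 1
    have hne : l.length - 1 - k ≠ k := by omega
    have h2 : l.length - 1 - k < l.length := by omega
    simp [aStep, hne, List.getElem_zip, List.getElem_reverse,
      List.getElem?_eq_getElem hkn, List.getElem?_eq_getElem h2]

-- A's whole flatMap form equals B's truncated flattened zip
theorem main_list (l : List Char) :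
    (List.range (l.length / 2 + l.length % 2)).flatMap (aStep l) =
      ((l.zip l.reverse).flatMap (fun p => [p.1, p.2])).take l.length := by
  rcases Nat.even_or_odd l.length with he | ho
  · have h2 : l.length % 2 = 0 := Nat.even_iff.mp he
    have hn : l.length = 2 * (l.length / 2) := by omega
    rw [h2, Nat.add_zero, range_flat l _ (le_refl _)]
    rw [show ((l.zip l.reverse).flatMap (fun p => [p.1, p.2])).take l.length
        = ((l.zip l.reverse).flatMap (fun p => [p.1, p.2])).take (2 * (l.length / 2)) by
      rw [← hn]]
    rw [flat_take_even _ _ (by simp; omega)]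
  · have h2 : l.length % 2 = 1 := Nat.odd_iff.mp ho
    have hmid : l.length / 2 < l.length := by omega
    have hzmid : l.length / 2 < (l.zip l.reverse).length := by simpa using hmid
    rw [h2, List.range_succ, List.flatMap_append, range_flat l _ (le_refl _),
      show ((l.zip l.reverse).flatMap (fun p => [p.1, p.2])).take l.length
          = ((l.zip l.reverse).flatMap (fun p => [p.1, p.2])).take (2 * (l.length / 2) + 1) by
        congr 1; omega,
      flat_take_odd _ _ hzmid]
    congr 1
    have hmidc : l.length - 1 - l.length / 2 = l.length / 2 := by omega
    simp [aStep, hmidc, List.getElem_zip, List.getElem?_eq_getElem hmid]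

-- ===== VERDICT (by name: the statement is the Claim_ definition above) =====
theorem solution_spec : Claim_equal_solution := by
  intro inputString _
  simp only [Spec_solution, solution, solution_alt]
  set l := inputString.toList with hl
  congr 1
  have hm : PySem.Int.floordiv (l.length : Int) 2 + PySem.Int.mod (l.length : Int) 2
      = ((l.length / 2 + l.length % 2 : Nat) : Int) := by
    rw [PySem.Int.floordiv_eq_ediv_of_pos (by norm_num),
      PySem.Int.mod_eq_emod_of_pos (by norm_num)]
    omega
  rw [hm, PySem.List.pyRange_one,
    show (((l.length / 2 + l.length % 2 : Nat) : Int) - 0).toNat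
      = l.length / 2 + l.length % 2 by omega,
    List.foldl_map,
    PySem.List.foldl_congr_mem _ _ (fun acc k => acc ++ aStep l k) [] ?_,
    PySem.List.foldl_append_eq_flatMap, List.nil_append, main_list]
  -- the loop body equals "append one round's characters"
  intro acc k hk
  simp only [List.mem_range] at hk
  have hkn : k < l.length := by omega
  simp only [zero_add]
  by_cases hne : l.length - 1 - k = k
  · have hC : ¬((l.length : Int) - 1 - (k : Int) ≠ (k : Int)) := by omega
    simp [hC, aStep, hne]
  · have hcast : ((l.length : Int) - 1 - (k : Int)) = ((l.length - 1 - k : Nat) : Int) := by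
      omega
    rw [hcast]
    have hC : (((l.length - 1 - k : Nat) : Int)) ≠ (k : Int) := by omega
    simp [hC, aStep, hne]
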